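-- pv_equiv track=rewrite | github.com/hangjeff/Discord_Bot_Poking_Lottery | main.py | Edit_Emoji
-- ===== SOURCE A (Python) =====
-- def Edit_Emoji(getStr):
--     emoji = getStr.split('#')[0: -1]
--     result = ""
--     for i in range(len(emoji)):
--             result += '||' + emoji[i] + '||'
--             if (i + 1) % 7 == 0:
--                result += '\r\n'
--     return result
-- ===== SOURCE B (Python) =====
-- def Edit_Emoji(getStr):
--     tokens = getStr.split('#')[:-1]
--     segments = []
--     while tokens:
--         group, tokens = tokens[:7], tokens[7:]
--         seg = ''.join('||' + t + '||' for t in group)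
--         if len(group) == 7:
--             seg += '\r\n'
--         segments.append(seg)
--     return ''.join(segments)
-- ===== Notes on version B (the rewrite author's own statement) =====
-- stated objective: alternative
-- what changed: Replaces the index loop with its mod-7 counter by chunking the token list into groups of 7 via repeated head-slicing, joining each group's wrapped tokens into a segment and appending the line break only to full groups.
import Mathlib
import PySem

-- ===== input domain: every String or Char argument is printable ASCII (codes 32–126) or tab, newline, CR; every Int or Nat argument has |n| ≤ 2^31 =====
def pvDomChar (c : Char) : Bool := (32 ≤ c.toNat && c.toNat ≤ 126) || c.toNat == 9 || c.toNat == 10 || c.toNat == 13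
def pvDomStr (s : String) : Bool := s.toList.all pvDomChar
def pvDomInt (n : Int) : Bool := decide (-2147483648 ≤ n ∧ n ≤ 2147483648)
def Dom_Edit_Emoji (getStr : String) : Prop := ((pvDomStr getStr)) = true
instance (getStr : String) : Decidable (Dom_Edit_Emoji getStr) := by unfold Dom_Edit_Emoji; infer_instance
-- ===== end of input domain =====

-- B replaces A's single index loop (with its (i+1)%7 counter) by chunking the token
-- list into groups of 7 and joining per-group segments; alternative decomposition, same cost.

-- ===== PORT A =====
-- literal port of A: index loop over range(len(emoji)), result accumulator, '\r\n' every 7th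
def Edit_Emoji (getStr : String) : String :=
  let emoji := PySem.List.slice (PySem.Chars.splitOn getStr.toList ['#']) (some 0) (some (-1))
  let result : List Char :=
    (PySem.List.pyRange 0 (PySem.List.len emoji) 1).foldl
      (fun result i =>
        let result := result ++ ('|' :: '|' :: PySem.List.pyGetD emoji i [] ++ ['|', '|'])
        if PySem.Int.mod (i + 1) 7 == 0 then result ++ ['\r', '\n'] else result)
      []
  String.ofList result

-- ===== PORT B =====
-- one segment of Source B's while-loop body: wrapped group tokens, '\r\n' only after a full group
def pvSeg (group : List (List Char)) : List Char :=
  let seg := PySem.Chars.join [] (group.map (fun t => '|' :: '|' :: t ++ ['|', '|']))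
  if group.length == 7 then seg ++ ['\r', '\n'] else seg

-- Source B's 'while tokens: group, tokens = tokens[:7], tokens[7:]'
def pvChunks : List (List Char) → List (List Char)
  | [] => []
  | t :: ts =>
    pvSeg (PySem.List.slice (t :: ts) none (some 7)) ::
      pvChunks (PySem.List.slice (t :: ts) (some 7) none)
  termination_by ts => ts.length + 1
  decreasing_by simp [PySem.List.slice]

def Edit_Emoji_alt (getStr : String) : String :=
  let tokens := PySem.List.slice (PySem.Chars.splitOn getStr.toList ['#']) none (some (-1))
  String.ofList (PySem.Chars.join [] (pvChunks tokens))

-- ===== PRECONDITION & SPEC =====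
def Spec_Edit_Emoji (getStr : String) (out : String) : Prop := out = Edit_Emoji_alt getStr
instance (getStr : String) (out : String) : Decidable (Spec_Edit_Emoji getStr out) := by unfold Spec_Edit_Emoji; infer_instance

-- ===== CLAIM (what is proved, stated in full; the proofs are below) =====
def Claim_equal_Edit_Emoji : Prop := ∀ (getStr : String), Dom_Edit_Emoji getStr → Spec_Edit_Emoji getStr (Edit_Emoji getStr)

-- ===== LEMMAS AND PROOFS =====

-- ''.join = flatten
theorem pvJoinNil : ∀ l : List (List Char), PySem.Chars.join [] l = l.flatten
  | [] => PySem.Chars.join_nil []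
  | [p] => by simp [PySem.Chars.join_singleton]
  | p :: q :: rest => by
      rw [PySem.Chars.join_cons_cons, pvJoinNil (q :: rest)]; simp

def pvWrap (t : List Char) : List Char := '|' :: '|' :: t ++ ['|', '|']

theorem pvWrap_eq : pvWrap = fun t => '|' :: '|' :: t ++ ['|', '|'] := rfl

-- canonical form: one token at a time with a mod-7 counter
def pvCore : List (List Char) → Nat → List Char
  | [], _ => []
  | t :: ts, c =>
    pvWrap t ++ (if c = 6 then ['\r', '\n'] else []) ++ pvCore ts ((c + 1) % 7)

def pvBodyA (acc : List Char) (p : Int × List Char) : List Char :=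
  let r := acc ++ ('|' :: '|' :: p.2 ++ ['|', '|'])
  if PySem.Int.mod (p.1 + 1) 7 == 0 then r ++ ['\r', '\n'] else r

theorem pvA_core (ts : List (List Char)) : ∀ (s : Int) (acc : List Char), 0 ≤ s →
    (PySem.List.enumerate ts s).foldl pvBodyA acc = acc ++ pvCore ts (s.toNat % 7) := by
  induction ts with
  | nil => intro s acc _; simp [PySem.List.enumerate, pvCore]
  | cons t ts ih =>
    intro s acc hs
    rw [PySem.List.enumerate_cons, List.foldl_cons, ih (s + 1) _ (by omega)]
    have hm : PySem.Int.mod (s + 1) 7 = (s + 1) % 7 := by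
      simp [PySem.Int.mod, Int.fmod_eq_emod]
    have hc : (s + 1).toNat % 7 = (s.toNat % 7 + 1) % 7 := by omega
    simp only [pvBodyA, pvCore, hm, hc, pvWrap]
    by_cases h : (s + 1) % 7 = 0
    · have h2 : s.toNat % 7 = 6 := by omega
      simp [h, h2]
    · have h2 : s.toNat % 7 ≠ 6 := by omega
      simp [h, h2]

theorem pvStep (ts : List (List Char)) : ∀ (c : Nat), c < 7 →
    pvCore ts c =
      ((ts.take (7 - c)).map pvWrap).flatten ++
        (if 7 - c ≤ ts.length then ['\r', '\n'] else []) ++ pvCore (ts.drop (7 - c)) 0 := by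
  induction ts with
  | nil =>
    intro c hc
    have h : ¬ (7 - c ≤ 0) := by omega
    simp [pvCore, h]
  | cons t ts ih =>
    intro c hc
    by_cases h6 : c = 6
    · subst h6
      simp [pvCore]
    · have h1 : (c + 1) % 7 = c + 1 := by omega
      have h2 : 7 - c = (7 - (c + 1)) + 1 := by omega
      simp only [pvCore, h1]
      rw [ih (c + 1) (by omega), h2]
      by_cases h : 7 - (c + 1) ≤ ts.length
      · have h' : 7 - (c + 1) + 1 ≤ (t :: ts).length := by simp; omega
        simp [h6]
      · have h' : ¬ (7 - (c + 1) + 1 ≤ (t :: ts).length) := by simp; omega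
        simp [h6]

theorem pvB_core : ∀ ts : List (List Char), (pvChunks ts).flatten = pvCore ts 0
  | [] => by simp [pvChunks, pvCore]
  | t :: ts => by
    rw [pvChunks]
    have hslice1 : PySem.List.slice (t :: ts) none (some 7) = (t :: ts).take 7 := by
      rw [show (7:Int) = ((7:Nat):Int) from rfl, PySem.List.slice_to_natCast]
    have hslice2 : PySem.List.slice (t :: ts) (some 7) none = (t :: ts).drop 7 := by
      rw [show (7:Int) = ((7:Nat):Int) from rfl, PySem.List.slice_from_natCast]
    rw [hslice1, hslice2, List.flatten_cons, pvB_core ((t :: ts).drop 7),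
      pvStep (t :: ts) 0 (by omega)]
    simp only [pvSeg, pvJoinNil, Nat.sub_zero]
    by_cases h : 6 ≤ ts.length
    · have h1 : ((t :: ts).take 7).length = 7 := by simp [List.length_take]; omega
      simp [h, pvWrap_eq]
    · have h1 : ((t :: ts).take 7).length ≠ 7 := by simp [List.length_take]; omega
      simp [h, pvWrap_eq]
  termination_by ts => ts.length
  decreasing_by simp

-- ===== VERDICT (by name: the statement is the Claim_ definition above) =====
theorem Edit_Emoji_spec : Claim_equal_Edit_Emoji := by
  intro getStr _
  unfold Spec_Edit_Emoji Edit_Emoji Edit_Emoji_alt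
  simp only [PySem.List.slice_zero_start]
  congr 1
  rw [pvJoinNil, pvB_core]
  calc (PySem.List.pyRange 0
          (PySem.List.len (PySem.List.slice (PySem.Chars.splitOn getStr.toList ['#']) none (some (-1))))
          1).foldl
        (fun result i =>
          let result := result ++ ('|' :: '|' ::
            PySem.List.pyGetD (PySem.List.slice (PySem.Chars.splitOn getStr.toList ['#']) none (some (-1))) i []
            ++ ['|', '|'])
          if PySem.Int.mod (i + 1) 7 == 0 then result ++ ['\r', '\n'] else result) []
      = (PySem.List.enumerate
          (PySem.List.slice (PySem.Chars.splitOn getStr.toList ['#']) none (some (-1))) 0).foldl pvBodyA [] := by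
        rw [PySem.List.enumerate_eq_map_pyRange _ ([] : List Char), List.foldl_map]
        rfl
    _ = pvCore (PySem.List.slice (PySem.Chars.splitOn getStr.toList ['#']) none (some (-1))) 0 := by
        simpa using pvA_core _ 0 [] le_rfl
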